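-- pv_equiv track=rewrite | github.com/fevzisuhansahin/Beginner | Python/OKUL/1_cas_odev_3.py | cut_to_2x2_matrix
-- ===== SOURCE A (Python) =====
-- def create_matrix(size):
--     return [[0 for _ in range(int(size))] for _ in range(int(size))]
--
-- def cut_to_2x2_matrix(matrix):
--     size = len(matrix)
--     new_matrix = create_matrix(size//2)
--     add = 0
--     for i in range(0,size,2):
--         for j in range(0,size,2):
--             add += matrix[i][j] + matrix[i+1][j+1]
--             new_matrix[i//2][j//2] = matrix[i][j] + matrix[i+1][j+1]
--     return new_matrix,add
-- ===== SOURCE B (Python) =====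
-- def _pair_row(r0, r1, n):
--     # walk the two rows with one cursor, pairing r0[k] with r1[k+1]
--     out = []
--     k = 0
--     while k < n:
--         out.append(r0[k] + r1[k + 1])
--         k += 2
--     return out
--
-- def _block_rows(rows, n):
--     # structural recursion: peel two rows at a time, downsample their leading n columns
--     if not rows:
--         return []
--     return [_pair_row(rows[0], rows[1], n)] + _block_rows(rows[2:], n)
--
-- def cut_to_2x2_matrix(matrix):
--     n = len(matrix)
--     new_matrix = _block_rows(matrix, n)
--     add = sum(map(sum, new_matrix))
--     return new_matrix, add
-- ===== Notes on version B (the rewrite author's own statement) =====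
-- stated objective: alternative
-- what changed: Replaces A's fused index-range loop (preallocated zero matrix mutated in place while a running total accumulates) with structural recursion that peels two rows at a time, a single-cursor walk pairing r0[k] with r1[k+1] inside each row pair, and a separate final sum-of-sums reduction for the total; no index arithmetic over the whole matrix and no preallocation.
import Mathlib
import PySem

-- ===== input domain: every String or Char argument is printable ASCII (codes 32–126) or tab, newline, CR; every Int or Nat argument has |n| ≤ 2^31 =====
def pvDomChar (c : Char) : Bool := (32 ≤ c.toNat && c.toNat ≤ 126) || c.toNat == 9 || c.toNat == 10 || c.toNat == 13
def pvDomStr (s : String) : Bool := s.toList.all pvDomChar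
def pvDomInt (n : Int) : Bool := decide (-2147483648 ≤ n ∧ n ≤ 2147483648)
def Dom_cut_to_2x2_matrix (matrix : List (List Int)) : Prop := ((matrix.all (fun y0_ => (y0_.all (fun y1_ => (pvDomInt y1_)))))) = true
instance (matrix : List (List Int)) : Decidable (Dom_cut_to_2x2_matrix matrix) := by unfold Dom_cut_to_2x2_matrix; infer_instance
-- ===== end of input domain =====

-- B replaces A's fused index-range loop (preallocated zero matrix mutated in place while a
-- running total accumulates) with structural recursion peeling two rows at a time, a cursor
-- walk over each row pair, and a separate final reduction for the total.

-- ===== PORT A =====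
def create_matrix (size : Int) : List (List Int) :=
  (List.range size.toNat).map (fun _ => (List.range size.toNat).map (fun _ => (0 : Int)))

def cut_to_2x2_matrix (matrix : List (List Int)) : List (List Int) × Int :=
  let size : Int := matrix.length
  let new_matrix := create_matrix (PySem.Int.floordiv size 2)
  (PySem.List.pyRange 0 size 2).foldl (fun (st : List (List Int) × Int) i =>
    (PySem.List.pyRange 0 size 2).foldl (fun (st : List (List Int) × Int) j =>
      let v : Int := PySem.List.pyGetD (PySem.List.pyGetD matrix i []) j 0
                     + PySem.List.pyGetD (PySem.List.pyGetD matrix (i + 1) []) (j + 1) 0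
      let add := st.2 + v
      -- new_matrix[i//2][j//2] = v  (read the row, write the cell, write the row back)
      let row := PySem.List.pyGetD st.1 (PySem.Int.floordiv i 2) []
      (PySem.List.pySetD st.1 (PySem.Int.floordiv i 2)
        (PySem.List.pySetD row (PySem.Int.floordiv j 2) v), add)) st)
    (new_matrix, 0)

-- ===== PORT B =====
-- Source B _pair_row: while k < n: out.append(r0[k]+r1[k+1]); k += 2
-- (r0[k]/r1[k+1] raise IndexError outside Pre_; getD is exact on Pre_, where they are in range)
def pvPairRowGo (r0 r1 : List Int) (n k : Nat) (out : List Int) : List Int :=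
  if k < n then
    pvPairRowGo r0 r1 n (k + 2) (out ++ [r0.getD k 0 + r1.getD (k + 1) 0])
  else out
termination_by n - k

def pvPairRow (r0 r1 : List Int) (n : Nat) : List Int := pvPairRowGo r0 r1 n 0 []

-- Source B _block_rows: peel two rows, recurse on rows[2:] (rows[1] raises on odd input outside Pre_)
def pvBlockRows (n : Nat) : List (List Int) → List (List Int)
  | [] => []
  | [r0] => [pvPairRow r0 [] n]
  | r0 :: r1 :: rest => pvPairRow r0 r1 n :: pvBlockRows n rest

def cut_to_2x2_matrix_alt (matrix : List (List Int)) : List (List Int) × Int :=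
  let n : Nat := matrix.length
  let new_matrix := pvBlockRows n matrix
  let add : Int := (new_matrix.map List.sum).sum
  (new_matrix, add)

-- ===== PRECONDITION & SPEC =====
-- Exactly the inputs where Python A returns: an even number of rows, and every row long
-- enough for the accesses matrix[i][j] (j ≤ len-2, even rows) and matrix[i+1][j+1] (odd rows).
def Pre_cut_to_2x2_matrix (matrix : List (List Int)) : Prop :=
  matrix.length % 2 = 0 ∧
  ∀ i < matrix.length,
    (if i % 2 = 0 then matrix.length - 1 else matrix.length) ≤ (matrix.getD i []).length

instance (matrix : List (List Int)) : Decidable (Pre_cut_to_2x2_matrix matrix) := by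
  unfold Pre_cut_to_2x2_matrix; infer_instance

def pvWitness_cut_to_2x2_matrix : List (List Int) := [[1, 2], [3, 4]]

def Spec_cut_to_2x2_matrix (matrix : List (List Int)) (out : List (List Int) × Int) : Prop := out = cut_to_2x2_matrix_alt matrix
instance (matrix : List (List Int)) (out : List (List Int) × Int) : Decidable (Spec_cut_to_2x2_matrix matrix out) := by unfold Spec_cut_to_2x2_matrix; infer_instance

-- ===== CLAIM (what is proved, stated in full; the proofs are below) =====
def Claim_equal_cut_to_2x2_matrix : Prop := ∀ (matrix : List (List Int)), Dom_cut_to_2x2_matrix matrix → Pre_cut_to_2x2_matrix matrix → Spec_cut_to_2x2_matrix matrix (cut_to_2x2_matrix matrix)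

-- ===== LEMMAS AND PROOFS =====

-- pvF m bi bj is the 2x2-block value matrix[2bi][2bj] + matrix[2bi+1][2bj+1] (total via pyGetD).
def pvF (m : List (List Int)) (bi bj : Nat) : Int :=
  PySem.List.pyGetD (PySem.List.pyGetD m (2 * (bi : Int)) []) (2 * (bj : Int)) 0
  + PySem.List.pyGetD (PySem.List.pyGetD m (2 * (bi : Int) + 1) []) (2 * (bj : Int) + 1) 0

theorem pv_map_set {α : Type} (e : α) (g : Nat → α) (h t : Nat) (ht : t < h) :
    ((List.range h).map (fun j => if j < t then g j else e)).set t (g t)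
    = (List.range h).map (fun j => if j < t + 1 then g j else e) := by
  apply List.ext_getElem
  · simp
  · intro j hj1 hj2
    simp only [List.getElem_set, List.getElem_map, List.getElem_range] at *
    split_ifs <;> first | rfl | omega | (subst_vars; rfl)

theorem pv_getD_map_range {α : Type} (g : Nat → α) (h k : Nat) (hk : k < h) (d : α) :
    ((List.range h).map g).getD k d = g k := by
  simp [List.getD, hk]

theorem pv_set_getD {α : Type} (l : List α) (i : Nat) (d : α) (h : i < l.length) :
    l.set i (l.getD i d) = l := by
  apply List.ext_getElem
  · simp
  · intro j hj1 hj2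
    simp only [List.getElem_set] at *
    split_ifs with hji
    · subst hji; simp [List.getD, List.getElem?_eq_getElem h]
    · rfl

-- A's inner loop over j: writes row cells 0..t-1 of row bi and accumulates their sum.
theorem pv_inner (f : Nat → Int) (h bi : Nat) (nm : List (List Int)) (a : Int)
    (hbi : bi < nm.length) (hrow : nm.getD bi [] = (List.range h).map (fun _ => (0:Int))) :
    ∀ t, t ≤ h →
    (List.range t).foldl
        (fun st bj => (st.1.set bi ((st.1.getD bi []).set bj (f bj)), st.2 + f bj)) (nm, a)
    = (nm.set bi ((List.range h).map (fun bj => if bj < t then f bj else 0)),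
       a + ((List.range t).map f).sum) := by
  intro t
  induction t with
  | zero =>
    intro _
    simp only [List.range_zero, List.map_nil, List.foldl_nil, List.sum_nil, add_zero]
    have : (List.range h).map (fun bj => if bj < 0 then f bj else (0:Int))
         = (List.range h).map (fun _ => (0:Int)) := by simp
    rw [this, ← hrow, pv_set_getD _ _ _ hbi]
  | succ t ih =>
    intro ht
    rw [List.range_succ, List.foldl_append, ih (by omega), List.foldl_cons, List.foldl_nil]
    have hget : ((nm.set bi ((List.range h).map (fun bj => if bj < t then f bj else 0))).getD bi [])
        = (List.range h).map (fun bj => if bj < t then f bj else 0) := by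
      simp [List.getD, List.getElem?_set_self hbi]
    simp only [hget, List.set_set]
    rw [pv_map_set 0 f h t (by omega)]
    simp [add_assoc]

-- A's outer loop over i: after k rows the matrix holds the first k computed rows and
-- add holds their total.
theorem pv_outer (F : Nat → Nat → Int) (h : Nat) :
    ∀ k, k ≤ h →
    (List.range k).foldl
        (fun st bi => (List.range h).foldl
          (fun st bj => (st.1.set bi ((st.1.getD bi []).set bj (F bi bj)), st.2 + F bi bj)) st)
        ((List.range h).map (fun _ => (List.range h).map (fun _ => (0:Int))), 0)
    = ((List.range h).map (fun bi => if bi < k then (List.range h).map (F bi)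
          else (List.range h).map (fun _ => (0:Int))),
       ((List.range k).map (fun bi => ((List.range h).map (F bi)).sum)).sum) := by
  intro k
  induction k with
  | zero => simp
  | succ k ih =>
    intro hk
    rw [List.range_succ, List.foldl_append, ih (by omega), List.foldl_cons, List.foldl_nil]
    have hbi : k < ((List.range h).map (fun bi => if bi < k then (List.range h).map (F bi)
        else (List.range h).map (fun _ => (0:Int)))).length := by simp; omega
    have hrow : ((List.range h).map (fun bi => if bi < k then (List.range h).map (F bi)
        else (List.range h).map (fun _ => (0:Int)))).getD k []
        = (List.range h).map (fun _ => (0:Int)) := by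
      rw [pv_getD_map_range _ h k (by omega)]
      simp
    rw [pv_inner (F k) h k _ _ hbi hrow h (le_refl h)]
    have hrowfull : (List.range h).map (fun bj => if bj < h then F k bj else 0)
         = (List.range h).map (F k) := by
      apply List.map_congr_left
      intro x hx
      simp at hx
      simp [hx]
    rw [hrowfull, pv_map_set ((List.range h).map (fun _ => (0:Int)))
          (fun bi => (List.range h).map (fun bj => F bi bj)) h k (by omega)]
    simp

-- A's fold, for an even number of rows, in index form (pyRange/floordiv discharged).
theorem pv_A_norm (m : List (List Int)) (hn : m.length % 2 = 0) :
    cut_to_2x2_matrix m =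
    (List.range (m.length/2)).foldl
      (fun st bi => (List.range (m.length/2)).foldl
        (fun st bj => (st.1.set bi ((st.1.getD bi []).set bj (pvF m bi bj)), st.2 + pvF m bi bj)) st)
      ((List.range (m.length/2)).map (fun _ => (List.range (m.length/2)).map (fun _ => (0:Int))), 0) := by
  have hcnt : (if (0:Int) < (m.length:Int) then (((m.length:Int) - 0 + 2 - 1)/2).toNat else 0)
      = m.length/2 := by split <;> omega
  have h2 : ∀ y : Nat, (2 * (y:Int)) / 2 = (y:Int) := fun y => by omega
  have htoNat : ((m.length:Int)/2).toNat = m.length/2 := by omega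
  simp only [cut_to_2x2_matrix, create_matrix,
    PySem.List.pyRange_of_pos 0 (m.length:Int) (by norm_num : (0:Int) < 2), hcnt,
    List.foldl_map, zero_add,
    PySem.Int.floordiv_eq_ediv_of_pos (by norm_num : (0:Int) < 2),
    h2, htoNat, PySem.List.pySetD_natCast, PySem.List.pyGetD_natCast, pvF]

-- pvF in plain-getD form (pyGetD with nonnegative cast indices = getD).
theorem pvF_eq (m : List (List Int)) (bi bj : Nat) :
    pvF m bi bj = (m.getD (2*bi) []).getD (2*bj) 0 + (m.getD (2*bi+1) []).getD (2*bj+1) 0 := by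
  have c1 : (2 * (bi : Int)) = ((2*bi : Nat) : Int) := by push_cast; ring
  have c2 : (2 * (bi : Int) + 1) = ((2*bi+1 : Nat) : Int) := by push_cast; ring
  have c3 : (2 * (bj : Int)) = ((2*bj : Nat) : Int) := by push_cast; ring
  have c4 : (2 * (bj : Int) + 1) = ((2*bj+1 : Nat) : Int) := by push_cast; ring
  unfold pvF
  rw [c2, c4, c1, c3]
  simp only [PySem.List.pyGetD_natCast]

-- B's cursor walk over a row pair: with bound n = 2h the loop emits the h diagonal sums.
theorem pv_go (r0 r1 : List Int) (h : Nat) :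
    ∀ d t out, h - t = d → t ≤ h →
    pvPairRowGo r0 r1 (2*h) (2*t) out
    = out ++ (List.range (h - t)).map (fun bj => r0.getD (2*(t+bj)) 0 + r1.getD (2*(t+bj)+1) 0) := by
  intro d
  induction d with
  | zero =>
    intro t out hd _
    rw [pvPairRowGo, if_neg (by omega), hd, List.range_zero, List.map_nil, List.append_nil]
  | succ d ih =>
    intro t out hd htle
    rw [pvPairRowGo, if_pos (by omega : 2*t < 2*h)]
    rw [show 2*t + 2 = 2*(t+1) by omega, ih (t+1) _ (by omega) (by omega)]
    rw [List.append_assoc]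
    congr 1
    rw [show h - t = d + 1 by omega, show h - (t+1) = d by omega, List.range_succ_eq_map]
    simp only [List.map_cons, List.map_map, List.singleton_append]
    congr 1
    apply List.map_congr_left
    intro x _
    have hx2 : t + 1 + x = t + (x + 1) := by omega
    simp [Function.comp, hx2]

theorem pv_pairRow (r0 r1 : List Int) (h : Nat) :
    pvPairRow r0 r1 (2*h) = (List.range h).map (fun bj => r0.getD (2*bj) 0 + r1.getD (2*bj+1) 0) := by
  have := pv_go r0 r1 h h 0 [] (by omega) (by omega)
  simpa using this

-- B's row recursion, characterised by block index.
theorem pv_blockRowsN (n : Nat) : ∀ (N : Nat) (rows : List (List Int)), rows.length ≤ N →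
    pvBlockRows n rows
    = (List.range ((rows.length+1)/2)).map (fun bi =>
        pvPairRow (rows.getD (2*bi) []) (rows.getD (2*bi+1) []) n) := by
  intro N
  induction N with
  | zero =>
    intro rows hN
    have : rows = [] := by cases rows <;> simp_all
    subst this
    simp [pvBlockRows]
  | succ N ih =>
    intro rows hN
    match rows with
    | [] => simp [pvBlockRows]
    | [r0] => simp [pvBlockRows, List.getD]
    | r0 :: r1 :: rest =>
      rw [show pvBlockRows n (r0 :: r1 :: rest)
          = pvPairRow r0 r1 n :: pvBlockRows n rest from rfl,
        ih rest (by simp at hN ⊢; omega)]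
      have hlen : ((r0 :: r1 :: rest).length + 1) / 2 = (rest.length + 1) / 2 + 1 := by
        simp; omega
      rw [hlen, List.range_succ_eq_map, List.map_cons, List.map_map]
      have htail : ∀ x ∈ List.range ((rest.length + 1) / 2),
          pvPairRow (rest.getD (2*x) []) (rest.getD (2*x+1) []) n
          = pvPairRow ((r0 :: r1 :: rest).getD (2*(x+1)) []) ((r0 :: r1 :: rest).getD (2*(x+1)+1) []) n := by
        intro x _
        have e1 : 2*(x+1) = 2*x + 1 + 1 := by omega
        rw [e1]
        simp [List.getD]
      rw [List.map_congr_left htail]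
      congr 1

theorem pv_blockRows (n : Nat) (rows : List (List Int)) :
    pvBlockRows n rows
    = (List.range ((rows.length+1)/2)).map (fun bi =>
        pvPairRow (rows.getD (2*bi) []) (rows.getD (2*bi+1) []) n) :=
  pv_blockRowsN n rows.length rows (le_refl _)

-- ===== VERDICT (by name: the statement is the Claim_ definition above) =====
theorem cut_to_2x2_matrix_spec : Claim_equal_cut_to_2x2_matrix := by
  intro m _ hpre
  obtain ⟨hn, hrows⟩ := hpre
  unfold Spec_cut_to_2x2_matrix
  set h := m.length / 2 with hh
  have hn2 : m.length = 2 * h := by omega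
  -- A's side in closed form
  rw [pv_A_norm m hn, pv_outer (pvF m) h h (le_refl _)]
  have hArows : (List.range h).map
      (fun bi => if bi < h then (List.range h).map (fun bj => pvF m bi bj)
        else (List.range h).map (fun _ => (0:Int)))
      = (List.range h).map (fun bi => (List.range h).map (fun bj => pvF m bi bj)) := by
    apply List.map_congr_left
    intro x hx
    simp at hx
    simp [hx]
  rw [hArows]
  -- B's side in the same closed form
  have hBrows : pvBlockRows m.length m
      = (List.range h).map (fun bi => (List.range h).map (fun bj => pvF m bi bj)) := by
    rw [pv_blockRows, show (m.length + 1)/2 = h by omega]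
    apply List.map_congr_left
    intro bi hbi
    simp only [List.mem_range] at hbi
    rw [show m.length = 2*h from hn2, pv_pairRow _ _ h]
    apply List.map_congr_left
    intro bj hbj
    rw [pvF_eq]
  show _ = cut_to_2x2_matrix_alt m
  simp only [cut_to_2x2_matrix_alt, hBrows, List.map_map]
  rfl
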